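-- pv_equiv track=rewrite | github.com/Morcroc/Computacion-UBA | IP/Python/guia7.py | banco
-- ===== SOURCE A (Python) =====
-- def banco(movimientos:"list[(str, int)]") -> int:
--     saldo:int = 0
--     for (mov, monto) in movimientos:
--         if(mov == 'I'):
--             saldo += monto
--         elif(mov == 'R'):
--             saldo -= monto
--
--     return saldo
-- ===== SOURCE B (Python) =====
-- def banco(movimientos: "list[(str, int)]") -> int:
--     ingresos = sum(monto for (mov, monto) in movimientos if mov == 'I')
--     retiros = sum(monto for (mov, monto) in movimientos if mov == 'R')
--     return ingresos - retiros
-- ===== Notes on version B (the rewrite author's own statement) =====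
-- stated objective: alternative
-- what changed: Replaces the single accumulating loop with an if/elif branch by two independent filtered sums (deposits and withdrawals) combined by one subtraction.
import Mathlib
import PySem

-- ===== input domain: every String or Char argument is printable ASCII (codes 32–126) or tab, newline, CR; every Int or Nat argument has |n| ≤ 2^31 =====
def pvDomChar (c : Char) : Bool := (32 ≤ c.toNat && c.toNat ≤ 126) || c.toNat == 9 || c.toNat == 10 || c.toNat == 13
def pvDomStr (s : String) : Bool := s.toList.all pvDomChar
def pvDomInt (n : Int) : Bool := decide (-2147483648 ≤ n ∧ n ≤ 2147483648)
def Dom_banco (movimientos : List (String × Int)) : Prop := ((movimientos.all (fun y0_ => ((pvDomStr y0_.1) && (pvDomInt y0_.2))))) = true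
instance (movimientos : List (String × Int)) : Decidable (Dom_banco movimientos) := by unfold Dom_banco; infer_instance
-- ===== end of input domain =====

-- B replaces A's single accumulating loop with an if/elif branch by two independent filtered sums (ingresos, retiros) combined by one subtraction (objective: alternative).


-- ===== PORT A =====
def banco (movimientos : List (String × Int)) : Int :=
  movimientos.foldl (fun saldo p =>
    if p.1 == "I" then saldo + p.2
    else if p.1 == "R" then saldo - p.2
    else saldo) 0

-- ===== PORT B =====
def banco_alt (movimientos : List (String × Int)) : Int :=
  let ingresos := ((movimientos.filter (fun p => p.1 == "I")).map (fun p => p.2)).sum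
  let retiros := ((movimientos.filter (fun p => p.1 == "R")).map (fun p => p.2)).sum
  ingresos - retiros

-- ===== PRECONDITION & SPEC =====
def Spec_banco (movimientos : List (String × Int)) (out : Int) : Prop := out = banco_alt movimientos
instance (movimientos : List (String × Int)) (out : Int) : Decidable (Spec_banco movimientos out) := by unfold Spec_banco; infer_instance

-- ===== CLAIM (what is proved, stated in full; the proofs are below) =====
def Claim_equal_banco : Prop := ∀ (movimientos : List (String × Int)), Dom_banco movimientos → Spec_banco movimientos (banco movimientos)

-- ===== LEMMAS AND PROOFS =====

-- ===== VERDICT (by name: the statement is the Claim_ definition above) =====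
lemma banco_foldl_shift (movimientos : List (String × Int)) (s : Int) :
    movimientos.foldl (fun saldo p =>
      if p.1 == "I" then saldo + p.2
      else if p.1 == "R" then saldo - p.2
      else saldo) s
    = s + (((movimientos.filter (fun p => p.1 == "I")).map (fun p => p.2)).sum
           - ((movimientos.filter (fun p => p.1 == "R")).map (fun p => p.2)).sum) := by
  induction movimientos generalizing s with
  | nil => simp
  | cons hd tl ih =>
    simp only [List.foldl_cons, List.filter_cons]
    rw [ih]
    by_cases h1 : hd.1 == "I" <;> by_cases h2 : hd.1 == "R" <;>
      simp_all <;> ring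

theorem banco_spec : Claim_equal_banco := by
  intro m _
  unfold Spec_banco banco banco_alt
  rw [banco_foldl_shift]
  simp
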